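-- pv_equiv track=rewrite | github.com/pypi-data/pypi-mirror-385 | packages/clippy-code/clippy_code-1.9.0-py3-none-any.whl/clippy/tools/edit_file.py | _find_matching_lines
-- ===== SOURCE A (Python) =====
-- def _split_pattern_lines(pattern: str) -> list[str]:
--     """Split a multi-line pattern while preserving intentional blank lines."""
--     normalized_pattern = pattern.replace("\r\n", "\n")
--     lines = normalized_pattern.splitlines()
--     if normalized_pattern.endswith("\n") and not lines:
--         return [""]
--     return lines
--
-- def _find_matching_lines(lines: list[str], pattern: str, match_pattern_line: bool) -> list[int]:
--     """Find all lines matching the pattern."""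
--     matching_indices: list[int] = []
--
--     # Check if pattern contains newlines (multi-line pattern)
--     is_multiline_pattern = "\n" in pattern or "\r\n" in pattern
--
--     if is_multiline_pattern and match_pattern_line:
--         # For multi-line patterns with exact matching, we need to match across multiple lines
--         pattern_lines = _split_pattern_lines(pattern)
--         if not pattern_lines:
--             return matching_indices
--
--         # Try to find the pattern starting at each line
--         for i in range(len(lines) - len(pattern_lines) + 1):
--             match = True
--             for j, pattern_line in enumerate(pattern_lines):
--                 line_without_eol = lines[i + j].rstrip("\r\n")
--                 # Normalize both pattern line and file line to LF for comparison
--                 normalized_file_line = line_without_eol.replace("\r\n", "\n")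
--                 if normalized_file_line != pattern_line:
--                     match = False
--                     break
--             if match:
--                 matching_indices.append(i)
--     else:
--         # Single-line pattern or substring matching
--         for i, line in enumerate(lines):
--             if match_pattern_line:
--                 # Full line equality match (remove EOL for comparison)
--                 if line.rstrip("\r\n") == pattern:
--                     matching_indices.append(i)
--             else:
--                 # Substring match (case insensitive)
--                 if pattern.lower() in line.lower():
--                     matching_indices.append(i)
--     return matching_indices
-- ===== SOURCE B (Python) =====
-- def _split_pattern_lines(pattern: str) -> list[str]:
--     """Split a multi-line pattern while preserving intentional blank lines."""
--     normalized_pattern = pattern.replace("\r\n", "\n")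
--     lines = normalized_pattern.splitlines()
--     if normalized_pattern.endswith("\n") and not lines:
--         return [""]
--     return lines
--
--
-- def _find_matching_lines(lines: list[str], pattern: str, match_pattern_line: bool) -> list[int]:
--     """Find all lines matching the pattern."""
--     if not match_pattern_line:
--         # Substring match (case insensitive)
--         p = pattern.lower()
--         return [i for i, line in enumerate(lines) if p in line.lower()]
--     # Exact matching, unified: every pattern is a block of one or more lines.
--     # Normalize each file line once, then intersect candidate start positions
--     # one pattern line at a time (pattern-line-outer staged filtering).
--     pattern_lines = _split_pattern_lines(pattern) if "\n" in pattern else [pattern]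
--     norm = [line.rstrip("\r\n").replace("\r\n", "\n") for line in lines]
--     candidates = list(range(len(norm) - len(pattern_lines) + 1))
--     for j, pattern_line in enumerate(pattern_lines):
--         candidates = [i for i in candidates if norm[i + j] == pattern_line]
--     return candidates
-- ===== Notes on version B (the rewrite author's own statement) =====
-- stated objective: faster
-- what changed: B collapses A's two exact-match branches into one block matcher: it normalizes every file line once, treats a single-line pattern as a one-line block, and finds block starts by pattern-line-outer staged filtering of a shrinking candidate list, instead of A's per-window nested inner loop that re-strips and re-normalizes each line for every candidate window.
import Mathlib
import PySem

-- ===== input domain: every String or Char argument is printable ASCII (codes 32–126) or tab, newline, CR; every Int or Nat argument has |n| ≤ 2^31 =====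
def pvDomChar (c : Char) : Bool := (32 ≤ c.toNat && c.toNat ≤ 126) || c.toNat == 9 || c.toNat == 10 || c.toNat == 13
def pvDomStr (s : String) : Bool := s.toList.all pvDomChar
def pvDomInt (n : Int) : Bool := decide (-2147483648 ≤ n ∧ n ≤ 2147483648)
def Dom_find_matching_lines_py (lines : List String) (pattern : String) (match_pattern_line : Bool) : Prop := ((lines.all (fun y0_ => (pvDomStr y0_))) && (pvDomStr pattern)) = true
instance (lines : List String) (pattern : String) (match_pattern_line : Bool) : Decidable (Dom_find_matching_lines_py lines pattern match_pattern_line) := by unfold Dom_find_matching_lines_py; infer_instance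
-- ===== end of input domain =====

-- B unifies both exact-match cases into one block matcher over a once-normalized line list and
-- finds the block by pattern-line-outer staged filtering of candidate starts, instead of A's
-- three branches with per-window nested loops that re-normalize lines (measured faster in a timing run).

-- ===== PORT A =====
-- exact port of Python's  s.rstrip("\r\n")  (strip '\r'/'\n' chars from the right; no PySem primitive takes a char set on one side)
def rstripCRLF (s : String) : String :=
  String.ofList ((s.toList.reverse.dropWhile (fun c => c == '\r' || c == '\n')).reverse)

-- the module helper _split_pattern_lines (used verbatim by both A and B)
def split_pattern_lines (pattern : String) : List String :=
  let normalized := PySem.Str.replace pattern "\r\n" "\n"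
  let lns := PySem.Str.splitlines normalized
  if PySem.Str.endswith normalized "\n" && lns.isEmpty then [""] else lns

-- the expression  line.rstrip("\r\n").replace("\r\n", "\n")  both programs apply to a file line
def normalizeLine (l : String) : String := PySem.Str.replace (rstripCRLF l) "\r\n" "\n"

-- A's inner 'for j, pattern_line in enumerate(pattern_lines)' loop with its break
def aMatchLoop (lines : List String) (i : Int) : List (Int × String) → Bool
  | [] => true
  | (j, pl) :: rest =>
    if normalizeLine (PySem.List.pyGetD lines (i + j) "") ≠ pl then false
    else aMatchLoop lines i rest

def find_matching_lines_py (lines : List String) (pattern : String) (match_pattern_line : Bool) : List Int :=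
  let is_multiline := PySem.Str.isIn "\n" pattern || PySem.Str.isIn "\r\n" pattern
  if is_multiline && match_pattern_line then
    let pattern_lines := split_pattern_lines pattern
    if pattern_lines.isEmpty then []
    else
      (PySem.List.pyRange 0 ((lines.length : Int) - (pattern_lines.length : Int) + 1) 1).foldl
        (fun acc i =>
          if aMatchLoop lines i (PySem.List.enumerate pattern_lines 0) then acc ++ [i] else acc) []
  else
    (PySem.List.enumerate lines 0).foldl
      (fun acc p =>
        if match_pattern_line then
          (if rstripCRLF p.2 == pattern then acc ++ [p.1] else acc)
        else
          (if PySem.Str.isIn (PySem.Str.lower pattern) (PySem.Str.lower p.2) then acc ++ [p.1]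
           else acc)) []

-- ===== PORT B =====
-- B's 'for j, pattern_line in enumerate(pattern_lines): candidates = [i for i in candidates if …]'
def refineStages (norm : List String) (stages : List (Int × String)) (cand : List Int) : List Int :=
  stages.foldl (fun c q => c.filter (fun i => PySem.List.pyGetD norm (i + q.1) "" == q.2)) cand

def find_matching_lines_py_alt (lines : List String) (pattern : String) (match_pattern_line : Bool) : List Int :=
  if !match_pattern_line then
    let p := PySem.Str.lower pattern
    (PySem.List.enumerate lines 0).filterMap
      (fun q => if PySem.Str.isIn p (PySem.Str.lower q.2) then some q.1 else none)
  else
    let pattern_lines :=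
      if PySem.Str.isIn "\n" pattern then split_pattern_lines pattern else [pattern]
    let norm := lines.map normalizeLine
    let candidates := PySem.List.pyRange 0 ((norm.length : Int) - (pattern_lines.length : Int) + 1) 1
    refineStages norm (PySem.List.enumerate pattern_lines 0) candidates

-- ===== PRECONDITION & SPEC =====
def Spec_find_matching_lines_py (lines : List String) (pattern : String) (match_pattern_line : Bool) (out : List Int) : Prop := out = find_matching_lines_py_alt lines pattern match_pattern_line
instance (lines : List String) (pattern : String) (match_pattern_line : Bool) (out : List Int) : Decidable (Spec_find_matching_lines_py lines pattern match_pattern_line out) := by unfold Spec_find_matching_lines_py; infer_instance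

-- ===== CLAIM =====
def Claim_equal_find_matching_lines_py : Prop := ∀ (lines : List String) (pattern : String) (match_pattern_line : Bool), Dom_find_matching_lines_py lines pattern match_pattern_line → Spec_find_matching_lines_py lines pattern match_pattern_line (find_matching_lines_py lines pattern match_pattern_line)

-- ===== LEMMAS AND PROOFS =====

-- "\r\n" in pattern implies "\n" in pattern, so A's is_multiline test collapses to B's
lemma multiline_or (pattern : String) :
    (PySem.Str.isIn "\n" pattern || PySem.Str.isIn "\r\n" pattern)
      = PySem.Str.isIn "\n" pattern := by
  cases h : PySem.Str.isIn "\n" pattern with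
  | true => simp
  | false =>
    simp only [Bool.false_or]
    cases h2 : PySem.Str.isIn "\r\n" pattern with
    | false => rfl
    | true =>
      exfalso
      have h2' : ("\r\n" : String).toList <:+: pattern.toList :=
        (PySem.Str.isIn_iff_infix _ _).mp h2
      have h1 : ("\n" : String).toList <:+: pattern.toList :=
        List.IsInfix.trans (by decide) h2'
      rw [show PySem.Str.isIn "\n" pattern = true from
        (PySem.Str.isIn_iff_infix _ _).mpr h1] at h
      simp at h

-- facts about the scanner of  s.replace("\r\n", "\n")
lemma rgo_no_nl (fuel : Nat) (l acc : List Char) (h : '\n' ∉ l) :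
    PySem.Chars.replace.go ['\r','\n'] ['\n'] fuel l acc = acc.reverse ++ l := by
  fun_induction PySem.Chars.replace.go ['\r','\n'] ['\n'] fuel l acc with
  | case1 => simp
  | case2 => simp
  | case3 a1 a2 a3 a4 hpre ih =>
    exact absurd ((List.isPrefixOf_iff_prefix.mp hpre).subset (by decide)) h
  | case4 a1 a2 a3 a4 hpre ih => rw [ih (by simp_all)]; simp

lemma rgo_mem_nl (fuel : Nat) (l acc : List Char) (h : '\n' ∈ l ∨ '\n' ∈ acc) :
    '\n' ∈ PySem.Chars.replace.go ['\r','\n'] ['\n'] fuel l acc := by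
  fun_induction PySem.Chars.replace.go ['\r','\n'] ['\n'] fuel l acc with
  | case1 => simp_all; tauto
  | case2 => simp_all
  | case3 a1 a2 a3 a4 hpre ih => exact ih (by simp)
  | case4 a1 a2 a3 a4 hpre ih =>
    apply ih
    rcases h with h | h
    · rcases List.mem_cons.mp h with h | h
      · exact Or.inr (List.mem_cons.mpr (Or.inl h))
      · exact Or.inl h
    · exact Or.inr (List.mem_cons.mpr (Or.inr h))

lemma rgo_ne (fuel : Nat) (l acc : List Char) (h : l ≠ [] ∨ acc ≠ []) :
    PySem.Chars.replace.go ['\r','\n'] ['\n'] fuel l acc ≠ [] := by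
  fun_induction PySem.Chars.replace.go ['\r','\n'] ['\n'] fuel l acc with
  | case1 => simp_all; tauto
  | case2 => simp_all
  | case3 a1 a2 a3 a4 hpre ih => exact ih (by simp)
  | case4 a1 a2 a3 a4 hpre ih => exact ih (by simp)

lemma replace_no_nl (s : String) (h : '\n' ∉ s.toList) :
    PySem.Str.replace s "\r\n" "\n" = s := by
  apply String.toList_inj.mp
  rw [PySem.Str.toList_replace]
  show PySem.Chars.replace s.toList ['\r','\n'] ['\n'] = s.toList
  simp only [PySem.Chars.replace]
  rw [if_neg (by decide), rgo_no_nl _ _ _ h]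
  simp

lemma replace_mem_nl (s : String) (h : '\n' ∈ s.toList) :
    '\n' ∈ (PySem.Str.replace s "\r\n" "\n").toList := by
  rw [PySem.Str.toList_replace]
  show '\n' ∈ PySem.Chars.replace s.toList ['\r','\n'] ['\n']
  simp only [PySem.Chars.replace]
  rw [if_neg (by decide)]
  exact rgo_mem_nl _ _ _ (Or.inl h)

lemma replace_toList_ne (s : String) (h : s.toList ≠ []) :
    (PySem.Str.replace s "\r\n" "\n").toList ≠ [] := by
  rw [PySem.Str.toList_replace]
  show PySem.Chars.replace s.toList ['\r','\n'] ['\n'] ≠ []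
  simp only [PySem.Chars.replace]
  rw [if_neg (by decide)]
  exact rgo_ne _ _ _ (Or.inl h)

lemma sgo_ne (isB : Char → Bool) (s cur : List Char) (acc : List (List Char))
    (h : s ≠ [] ∨ cur ≠ [] ∨ acc ≠ []) :
    PySem.Chars.splitlines.go isB s cur acc ≠ [] := by
  fun_induction PySem.Chars.splitlines.go isB s cur acc <;> simp_all

-- a multi-line pattern never yields an empty pattern_lines list, so A's early-return guard is dead
lemma split_pattern_lines_ne (pattern : String)
    (h : PySem.Str.isIn "\n" pattern = true) : split_pattern_lines pattern ≠ [] := by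
  have hmem : '\n' ∈ pattern.toList :=
    (List.singleton_infix_iff '\n' pattern.toList).mp
      (by simpa using (PySem.Str.isIn_iff_infix _ _).mp h)
  have hne : (PySem.Str.replace pattern "\r\n" "\n").toList ≠ [] :=
    replace_toList_ne pattern (by intro h0; rw [h0] at hmem; exact List.not_mem_nil hmem)
  have hchars : PySem.Chars.splitlines (PySem.Str.replace pattern "\r\n" "\n").toList ≠ [] := by
    simp only [PySem.Chars.splitlines]
    exact sgo_ne _ _ _ _ (Or.inl hne)
  have hlns : PySem.Str.splitlines (PySem.Str.replace pattern "\r\n" "\n") ≠ [] := by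
    intro h0
    have hb := PySem.Str.splitlines_map_toList (PySem.Str.replace pattern "\r\n" "\n")
    rw [h0] at hb
    exact hchars hb.symm
  show (if PySem.Str.endswith (PySem.Str.replace pattern "\r\n" "\n") "\n" &&
        (PySem.Str.splitlines (PySem.Str.replace pattern "\r\n" "\n")).isEmpty
      then [""] else PySem.Str.splitlines (PySem.Str.replace pattern "\r\n" "\n")) ≠ []
  split
  · simp
  · exact hlns

-- B's window predicate: pattern lines against the normalized list, starting at offset j
def wmatch (norm : List String) (i : Int) : Int → List String → Bool
  | _, [] => true
  | j, pl :: rest => (PySem.List.pyGetD norm (i + j) "" == pl) && wmatch norm i (j + 1) rest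

-- B's staged candidate filtering computes one filter by the window predicate
lemma refine_eq (norm : List String) :
    ∀ (pat : List String) (j : Int) (cand : List Int),
    refineStages norm (PySem.List.enumerate pat j) cand
      = cand.filter (fun i => wmatch norm i j pat) := by
  intro pat
  induction pat with
  | nil => intro j cand; simp [refineStages, PySem.List.enumerate_nil, wmatch]
  | cons pl rest ih =>
    intro j cand
    rw [PySem.List.enumerate_cons]
    show refineStages norm (PySem.List.enumerate rest (j + 1))
        (cand.filter (fun i => PySem.List.pyGetD norm (i + j) "" == pl))
      = cand.filter (fun i => wmatch norm i j (pl :: rest))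
    rw [ih (j + 1), List.filter_filter]
    apply List.filter_congr
    intro i _
    rw [Bool.and_comm]
    rfl

lemma normalizeLine_empty : normalizeLine "" = "" := rfl

-- A's inner break-loop over the raw lines IS B's window predicate over the normalized list
lemma aMatch_eq_wmatch (lines : List String) :
    ∀ (pat : List String) (j i : Int),
    aMatchLoop lines i (PySem.List.enumerate pat j)
      = wmatch (lines.map normalizeLine) i j pat := by
  intro pat
  induction pat with
  | nil => intro j i; simp [PySem.List.enumerate_nil, aMatchLoop, wmatch]
  | cons pl rest ih =>
    intro j i
    rw [PySem.List.enumerate_cons]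
    simp only [aMatchLoop, wmatch]
    have hmap : PySem.List.pyGetD (lines.map normalizeLine) (i + j) ""
        = normalizeLine (PySem.List.pyGetD lines (i + j) "") := by
      rw [show ("" : String) = normalizeLine "" from normalizeLine_empty.symm]
      exact PySem.List.pyGetD_map normalizeLine lines (i + j) ""
    rw [hmap]
    by_cases h : normalizeLine (PySem.List.pyGetD lines (i + j) "") = pl
    · rw [if_neg (by simp [h]), ih (j + 1) i]
      simp [h]
    · rw [if_pos (by simp [h])]
      simp [h]

-- single-line exact match: comparing the normalized line is comparing the rstripped line,
-- because the pattern contains no '\n'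
lemma norm_eq_rstrip (pattern l : String) (hp : PySem.Str.isIn "\n" pattern = false) :
    (normalizeLine l == pattern) = (rstripCRLF l == pattern) := by
  have hnp : '\n' ∉ pattern.toList := by
    intro hmem
    rw [(PySem.Str.isIn_iff_infix _ _).mpr
      (by simpa using (List.singleton_infix_iff '\n' pattern.toList).mpr hmem)] at hp
    simp at hp
  by_cases h : '\n' ∈ (rstripCRLF l).toList
  · have h1 : rstripCRLF l ≠ pattern := by
      intro h0; rw [h0] at h; exact hnp h
    have h2 : normalizeLine l ≠ pattern := by
      intro h0
      exact hnp (h0 ▸ replace_mem_nl _ h)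
    simp [h1, h2]
  · unfold normalizeLine
    rw [replace_no_nl _ h]

-- the enumerate-append fold over lines is the filtered index range of the line test c
lemma enumerate_fold_eq_range_filter (lines : List String) (c : String → Bool) :
    (PySem.List.enumerate lines 0).foldl
        (fun acc p => if c p.2 then acc ++ [p.1] else acc) []
      = (PySem.List.pyRange 0 (lines.length : Int) 1).filter
          (fun j => c (PySem.List.pyGetD lines j "")) := by
  rw [PySem.List.foldl_append_if (fun p : Int × String => c p.2) (fun p => p.1),
    PySem.List.enumerate_eq_map_pyRange lines "", List.filter_map, List.map_map]
  simp [PySem.List.len, Function.comp_def]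

theorem find_matching_lines_py_spec : Claim_equal_find_matching_lines_py := by
  intro lines pattern match_pattern_line _hdom
  unfold Spec_find_matching_lines_py find_matching_lines_py find_matching_lines_py_alt
  simp only [multiline_or]
  cases match_pattern_line with
  | false =>
    simp only [Bool.and_false, Bool.false_eq_true, if_false, Bool.not_false, if_true]
    rw [PySem.List.foldl_append_if
        (fun p : Int × String =>
          PySem.Str.isIn (PySem.Str.lower pattern) (PySem.Str.lower p.2)) (fun p => p.1)]
    induction PySem.List.enumerate lines 0 with
    | nil => rfl
    | cons q t iht =>
      by_cases h : PySem.Str.isIn (PySem.Str.lower pattern) (PySem.Str.lower q.2) <;>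
        simp_all
  | true =>
    cases hn : PySem.Str.isIn "\n" pattern with
    | true =>
      simp only [Bool.and_true, Bool.not_true, Bool.false_eq_true, if_false, if_true]
      rw [if_neg (by simpa using split_pattern_lines_ne pattern hn)]
      rw [PySem.List.foldl_append_if
        (fun i => aMatchLoop lines i (PySem.List.enumerate (split_pattern_lines pattern) 0))
        (fun i : Int => i), refine_eq]
      have hfun : (fun i => aMatchLoop lines i
            (PySem.List.enumerate (split_pattern_lines pattern) 0))
          = fun i => wmatch (lines.map normalizeLine) i 0 (split_pattern_lines pattern) :=
        funext (fun i => aMatch_eq_wmatch lines (split_pattern_lines pattern) 0 i)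
      rw [hfun]
      simp
    | false =>
      simp only [Bool.and_true, Bool.not_true, Bool.false_eq_true, if_false, if_true]
      rw [enumerate_fold_eq_range_filter lines (fun l => rstripCRLF l == pattern), refine_eq]
      have hrange : PySem.List.pyRange 0
            (((lines.map normalizeLine).length : Int) - (([pattern] : List String).length : Int) + 1) 1
          = PySem.List.pyRange 0 (lines.length : Int) 1 := by
        congr 1
        simp
      rw [hrange]
      apply List.filter_congr
      intro i _
      show (rstripCRLF (PySem.List.pyGetD lines i "") == pattern)
        = wmatch (lines.map normalizeLine) i 0 [pattern]
      have hmap : PySem.List.pyGetD (lines.map normalizeLine) (i + 0) ""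
          = normalizeLine (PySem.List.pyGetD lines (i + 0) "") := by
        rw [show ("" : String) = normalizeLine "" from normalizeLine_empty.symm]
        exact PySem.List.pyGetD_map normalizeLine lines (i + 0) ""
      rw [show wmatch (lines.map normalizeLine) i 0 [pattern]
          = ((PySem.List.pyGetD (lines.map normalizeLine) (i + 0) "" == pattern) && true) from rfl,
        hmap, Bool.and_true, add_zero,
        norm_eq_rstrip pattern (PySem.List.pyGetD lines i "") hn]
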